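-- pv_equiv track=rewrite | github.com/csmith-03/ethics_ai | generate_nusmv.py | generate_nusmv_code
-- ===== SOURCE A (Python) =====
-- def generate_nusmv_code(obstacle_count):
--     distances = ', '.join([f'd_{50 * i}' for i in range(2 * obstacle_count + 1)])
--     obstacle_defs = ', '.join([f'obst_{i + 1}' for i in range(obstacle_count)])
--
--     # Correctly generate movement cases without referencing undefined distances
--     movement_cases = [
--         'aircraft_movement = stop & distance = d_0 : move_forward;',
--     ] + [
--         f'aircraft_movement = move_forward & distance = d_{50 * i} : {{move_forward, turn_right}};' for i in range(1, 2 * obstacle_count, 2)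
--     ] + [
--         f'aircraft_movement = move_forward & distance = d_{50 * i} & obstacles = obst_{(i+1)//2}: stop;' for i in range(2, 2 * obstacle_count, 2)
--     ] + [
--         'aircraft_movement = turn_right : move_forward;',
--         f'aircraft_movement = move_forward & distance = d_{50 * 2 * obstacle_count} & obstacles != obst_{obstacle_count}: take_off;',
--         'aircraft_movement = take_off : take_off;',
--         'TRUE : aircraft_movement;'
--     ]
--
--     distance_cases = [
--         f'aircraft_movement = move_forward & distance = d_{50 * i} : d_{50 * (i + 1)};' for i in range(2 * obstacle_count)
--     ] + [
--         f'aircraft_movement = turn_right & distance = d_{50 * i} : d_{50 * (i + 1)};' for i in range(1, 2 * obstacle_count, 2)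
--     ] + [
--         'TRUE : distance;'
--     ]
--
--     obstacle_cases = [
--         f'aircraft_movement = move_forward & distance = d_{50 * i} : obst_{(i+1)//2};' for i in range(2, 2 * obstacle_count, 2)
--     ] + [
--         'TRUE : obstacles;'
--     ]
--
--     movement_cases_str = '\n    '.join(movement_cases)
--     distance_cases_str = '\n    '.join(distance_cases)
--     obstacle_cases_str = '\n    '.join(obstacle_cases)
--
--     return f"""MODULE main
-- VAR
--   aircraft_movement: {{turn_right, move_forward, stop, take_off}};
--   distance: {{{distances}}};
--   obstacles: {{none, {obstacle_defs}}};
--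
-- ASSIGN
--   init(aircraft_movement) := stop;
--   init(distance) := d_0;
--   init(obstacles) := none;
--
--   next(aircraft_movement) :=
--   case
--     {movement_cases_str}
--   esac;
--
--   next(distance) :=
--   case
--     {distance_cases_str}
--   esac;
--
-- next(obstacles) :=
--   case
--     {obstacle_cases_str}
--   esac;
--
-- CTLSPEC
--   EF(aircraft_movement = take_off);
--
-- CTLSPEC
--   EG(aircraft_movement = move_forward | aircraft_movement = stop | aircraft_movement = turn_right | aircraft_movement = take_off);
--
-- CTLSPEC
--   EF(aircraft_movement = stop);
--
-- CTLSPEC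
--   EF(distance = d_50);
-- """
-- ===== SOURCE B (Python) =====
-- def _segment(j, obstacle_count):
--     # Full contribution of road segment j to each of the seven buckets
--     # (distance names, obstacle names, movement odd/even cases, forward/turn
--     # distance cases, obstacle cases).  Segment 0 is the starting position.
--     if j == 0:
--         return (['d_0'], [], [], [], [], [], [])
--     a = 2 * j - 1
--     b = 2 * j
--     return (
--         [f'd_{50 * a}', f'd_{50 * b}'],
--         [f'obst_{j}'],
--         [f'aircraft_movement = move_forward & distance = d_{50 * a} : {{move_forward, turn_right}};'],
--         [f'aircraft_movement = move_forward & distance = d_{50 * b} & obstacles = obst_{j}: stop;'] if j < obstacle_count else [],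
--         [f'aircraft_movement = move_forward & distance = d_{50 * (a - 1)} : d_{50 * a};',
--          f'aircraft_movement = move_forward & distance = d_{50 * a} : d_{50 * b};'],
--         [f'aircraft_movement = turn_right & distance = d_{50 * a} : d_{50 * b};'],
--         [f'aircraft_movement = move_forward & distance = d_{50 * b} : obst_{j};'] if j < obstacle_count else [],
--     )
--
--
-- def generate_nusmv_code(obstacle_count):
--     # Build the model segment by segment: each obstacle owns one two-step road
--     # segment, and a helper emits everything that segment contributes.
--     dist, obst, mvo, mve, dcf, dct, oc = [], [], [], [], [], [], []
--     for j in range(obstacle_count + 1):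
--         s1, s2, s3, s4, s5, s6, s7 = _segment(j, obstacle_count)
--         dist += s1; obst += s2; mvo += s3; mve += s4
--         dcf += s5; dct += s6; oc += s7
--
--     movement_cases = (['aircraft_movement = stop & distance = d_0 : move_forward;']
--         + mvo + mve
--         + ['aircraft_movement = turn_right : move_forward;',
--            f'aircraft_movement = move_forward & distance = d_{50 * 2 * obstacle_count} & obstacles != obst_{obstacle_count}: take_off;',
--            'aircraft_movement = take_off : take_off;',
--            'TRUE : aircraft_movement;'])
--     distance_cases = dcf + dct + ['TRUE : distance;']
--     obstacle_cases = oc + ['TRUE : obstacles;']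
--
--     sep = '\n    '
--     return f"""MODULE main
-- VAR
--   aircraft_movement: {{turn_right, move_forward, stop, take_off}};
--   distance: {{{', '.join(dist)}}};
--   obstacles: {{none, {', '.join(obst)}}};
--
-- ASSIGN
--   init(aircraft_movement) := stop;
--   init(distance) := d_0;
--   init(obstacles) := none;
--
--   next(aircraft_movement) :=
--   case
--     {sep.join(movement_cases)}
--   esac;
--
--   next(distance) :=
--   case
--     {sep.join(distance_cases)}
--   esac;
--
-- next(obstacles) :=
--   case
--     {sep.join(obstacle_cases)}
--   esac;
--
-- CTLSPEC
--   EF(aircraft_movement = take_off);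
--
-- CTLSPEC
--   EG(aircraft_movement = move_forward | aircraft_movement = stop | aircraft_movement = turn_right | aircraft_movement = take_off);
--
-- CTLSPEC
--   EF(aircraft_movement = stop);
--
-- CTLSPEC
--   EF(distance = d_50);
-- """
-- ===== Notes on version B (the rewrite author's own statement) =====
-- stated objective: alternative
-- what changed: B decomposes the model by road segment: a helper emits each obstacle segment's full contribution (its two distance names, obstacle name and all its case lines) and one pass over segments 0..n concatenates seven buckets, replacing A's six independent index comprehensions with parity strides.
import Mathlib
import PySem

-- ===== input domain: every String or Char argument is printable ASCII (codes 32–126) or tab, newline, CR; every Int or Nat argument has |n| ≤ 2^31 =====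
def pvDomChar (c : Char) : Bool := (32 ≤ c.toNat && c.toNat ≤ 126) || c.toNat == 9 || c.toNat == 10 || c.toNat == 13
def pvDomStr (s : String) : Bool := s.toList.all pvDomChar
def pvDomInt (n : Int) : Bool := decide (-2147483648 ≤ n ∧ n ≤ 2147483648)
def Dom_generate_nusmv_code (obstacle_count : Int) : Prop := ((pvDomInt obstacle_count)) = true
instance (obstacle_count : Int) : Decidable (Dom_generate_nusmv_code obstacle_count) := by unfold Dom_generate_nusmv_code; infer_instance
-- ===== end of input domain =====

-- B builds the model segment by segment: a helper emits each obstacle segment's full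
-- contribution (distance names, obstacle name, case lines) and one pass concatenates the
-- seven buckets, instead of A's six independent range comprehensions (objective: alternative).


-- ===== PORT A =====
def generate_nusmv_code (obstacle_count : Int) : String :=
  let distances := PySem.Str.join ", " ((PySem.List.pyRange 0 (2 * obstacle_count + 1) 1).map
    (fun i => "d_" ++ PySem.Int.toStr (50 * i)))
  let obstacle_defs := PySem.Str.join ", " ((PySem.List.pyRange 0 obstacle_count 1).map
    (fun i => "obst_" ++ PySem.Int.toStr (i + 1)))
  let movement_cases :=
    ["aircraft_movement = stop & distance = d_0 : move_forward;"]
    ++ (PySem.List.pyRange 1 (2 * obstacle_count) 2).map (fun i =>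
        "aircraft_movement = move_forward & distance = d_" ++ PySem.Int.toStr (50 * i)
          ++ " : {move_forward, turn_right};")
    ++ (PySem.List.pyRange 2 (2 * obstacle_count) 2).map (fun i =>
        "aircraft_movement = move_forward & distance = d_" ++ PySem.Int.toStr (50 * i)
          ++ " & obstacles = obst_" ++ PySem.Int.toStr (PySem.Int.floordiv (i + 1) 2) ++ ": stop;")
    ++ ["aircraft_movement = turn_right : move_forward;",
        "aircraft_movement = move_forward & distance = d_" ++ PySem.Int.toStr (50 * 2 * obstacle_count)
          ++ " & obstacles != obst_" ++ PySem.Int.toStr obstacle_count ++ ": take_off;",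
        "aircraft_movement = take_off : take_off;",
        "TRUE : aircraft_movement;"]
  let distance_cases :=
    (PySem.List.pyRange 0 (2 * obstacle_count) 1).map (fun i =>
        "aircraft_movement = move_forward & distance = d_" ++ PySem.Int.toStr (50 * i)
          ++ " : d_" ++ PySem.Int.toStr (50 * (i + 1)) ++ ";")
    ++ (PySem.List.pyRange 1 (2 * obstacle_count) 2).map (fun i =>
        "aircraft_movement = turn_right & distance = d_" ++ PySem.Int.toStr (50 * i)
          ++ " : d_" ++ PySem.Int.toStr (50 * (i + 1)) ++ ";")
    ++ ["TRUE : distance;"]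
  let obstacle_cases :=
    (PySem.List.pyRange 2 (2 * obstacle_count) 2).map (fun i =>
        "aircraft_movement = move_forward & distance = d_" ++ PySem.Int.toStr (50 * i)
          ++ " : obst_" ++ PySem.Int.toStr (PySem.Int.floordiv (i + 1) 2) ++ ";")
    ++ ["TRUE : obstacles;"]
  let movement_cases_str := PySem.Str.join "\n    " movement_cases
  let distance_cases_str := PySem.Str.join "\n    " distance_cases
  let obstacle_cases_str := PySem.Str.join "\n    " obstacle_cases
  "MODULE main\nVAR\n  aircraft_movement: {turn_right, move_forward, stop, take_off};\n  distance: {"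
  ++ distances ++ "};\n  obstacles: {none, " ++ obstacle_defs
  ++ "};\n\nASSIGN\n  init(aircraft_movement) := stop;\n  init(distance) := d_0;\n  init(obstacles) := none;\n  \n  next(aircraft_movement) :=\n  case\n    "
  ++ movement_cases_str
  ++ "\n  esac;\n\n  next(distance) :=\n  case\n    "
  ++ distance_cases_str
  ++ "\n  esac;\n\nnext(obstacles) :=\n  case\n    "
  ++ obstacle_cases_str
  ++ "\n  esac;\n    \nCTLSPEC\n  EF(aircraft_movement = take_off);\n\nCTLSPEC\n  EG(aircraft_movement = move_forward | aircraft_movement = stop | aircraft_movement = turn_right | aircraft_movement = take_off);\n\nCTLSPEC\n  EF(aircraft_movement = stop);\n\nCTLSPEC\n  EF(distance = d_50);\n"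

-- ===== PORT B =====
-- _segment(j, obstacle_count): the seven bucket contributions of road segment j
def pvSegment (j n : Int) :
    List String × List String × List String × List String × List String × List String × List String :=
  if j = 0 then (["d_0"], [], [], [], [], [], [])
  else
    let a := 2 * j - 1
    let b := 2 * j
    (["d_" ++ PySem.Int.toStr (50 * a), "d_" ++ PySem.Int.toStr (50 * b)],
     ["obst_" ++ PySem.Int.toStr j],
     ["aircraft_movement = move_forward & distance = d_" ++ PySem.Int.toStr (50 * a)
        ++ " : {move_forward, turn_right};"],
     (if j < n then
        ["aircraft_movement = move_forward & distance = d_" ++ PySem.Int.toStr (50 * b)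
          ++ " & obstacles = obst_" ++ PySem.Int.toStr j ++ ": stop;"] else []),
     ["aircraft_movement = move_forward & distance = d_" ++ PySem.Int.toStr (50 * (a - 1))
        ++ " : d_" ++ PySem.Int.toStr (50 * a) ++ ";",
      "aircraft_movement = move_forward & distance = d_" ++ PySem.Int.toStr (50 * a)
        ++ " : d_" ++ PySem.Int.toStr (50 * b) ++ ";"],
     ["aircraft_movement = turn_right & distance = d_" ++ PySem.Int.toStr (50 * a)
        ++ " : d_" ++ PySem.Int.toStr (50 * b) ++ ";"],
     (if j < n then
        ["aircraft_movement = move_forward & distance = d_" ++ PySem.Int.toStr (50 * b)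
          ++ " : obst_" ++ PySem.Int.toStr j ++ ";"] else []))

-- bucket.extend(part) for the seven zipped buckets
def pvApp7
    (x y : List String × List String × List String × List String × List String × List String × List String) :
    List String × List String × List String × List String × List String × List String × List String :=
  (x.1 ++ y.1, x.2.1 ++ y.2.1, x.2.2.1 ++ y.2.2.1, x.2.2.2.1 ++ y.2.2.2.1,
   x.2.2.2.2.1 ++ y.2.2.2.2.1, x.2.2.2.2.2.1 ++ y.2.2.2.2.2.1, x.2.2.2.2.2.2 ++ y.2.2.2.2.2.2)

def generate_nusmv_code_alt (obstacle_count : Int) : String :=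
  match (PySem.List.pyRange 0 (obstacle_count + 1) 1).foldl
      (fun acc j => pvApp7 acc (pvSegment j obstacle_count)) ([], [], [], [], [], [], []) with
  | (dist, obst, mvo, mve, dcf, dct, oc) =>
    let movement_cases :=
      ["aircraft_movement = stop & distance = d_0 : move_forward;"]
      ++ mvo ++ mve
      ++ ["aircraft_movement = turn_right : move_forward;",
          "aircraft_movement = move_forward & distance = d_" ++ PySem.Int.toStr (50 * 2 * obstacle_count)
            ++ " & obstacles != obst_" ++ PySem.Int.toStr obstacle_count ++ ": take_off;",
          "aircraft_movement = take_off : take_off;",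
          "TRUE : aircraft_movement;"]
    let distance_cases := dcf ++ dct ++ ["TRUE : distance;"]
    let obstacle_cases := oc ++ ["TRUE : obstacles;"]
    "MODULE main\nVAR\n  aircraft_movement: {turn_right, move_forward, stop, take_off};\n  distance: {"
    ++ PySem.Str.join ", " dist ++ "};\n  obstacles: {none, " ++ PySem.Str.join ", " obst
    ++ "};\n\nASSIGN\n  init(aircraft_movement) := stop;\n  init(distance) := d_0;\n  init(obstacles) := none;\n  \n  next(aircraft_movement) :=\n  case\n    "
    ++ PySem.Str.join "\n    " movement_cases
    ++ "\n  esac;\n\n  next(distance) :=\n  case\n    "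
    ++ PySem.Str.join "\n    " distance_cases
    ++ "\n  esac;\n\nnext(obstacles) :=\n  case\n    "
    ++ PySem.Str.join "\n    " obstacle_cases
    ++ "\n  esac;\n    \nCTLSPEC\n  EF(aircraft_movement = take_off);\n\nCTLSPEC\n  EG(aircraft_movement = move_forward | aircraft_movement = stop | aircraft_movement = turn_right | aircraft_movement = take_off);\n\nCTLSPEC\n  EF(aircraft_movement = stop);\n\nCTLSPEC\n  EF(distance = d_50);\n"

-- ===== PRECONDITION & SPEC =====
def Spec_generate_nusmv_code (obstacle_count : Int) (out : String) : Prop := out = generate_nusmv_code_alt obstacle_count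
instance (obstacle_count : Int) (out : String) : Decidable (Spec_generate_nusmv_code obstacle_count out) := by unfold Spec_generate_nusmv_code; infer_instance

-- ===== CLAIM (what is proved, stated in full; the proofs are below) =====
def Claim_equal_generate_nusmv_code : Prop := ∀ (obstacle_count : Int), Dom_generate_nusmv_code obstacle_count → Spec_generate_nusmv_code obstacle_count (generate_nusmv_code obstacle_count)

-- ===== LEMMAS AND PROOFS =====

lemma pv_nonneg_nat (n : Int) (hn : 0 ≤ n) : ∃ m : Nat, n = (m:Int) := ⟨n.toNat, (Int.toNat_of_nonneg hn).symm⟩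

lemma pv_range_cast (M : Nat) : PySem.List.pyRange 0 (M:Int) 1 = (List.range M).map (fun (k : Nat) => (k:Int)) := by
  rw [PySem.List.pyRange_one]; simp

lemma pv_step2_from1 (m : Nat) :
    PySem.List.pyRange 1 (2*(m:Int)) 2 = (List.range m).map (fun (k : Nat) => 1 + 2*(k:Int)) := by
  rw [PySem.List.pyRange_of_pos _ _ (by norm_num)]
  have hc : (if (1:Int) < 2*(m:Int) then ((2*(m:Int) - 1 + 2 - 1)/2).toNat else 0) = m := by
    split <;> omega
  rw [hc]

lemma pv_step2_from2 (m : Nat) :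
    PySem.List.pyRange 2 (2*(m:Int)) 2 = (List.range (m-1)).map (fun (k : Nat) => 2 + 2*(k:Int)) := by
  rw [PySem.List.pyRange_of_pos _ _ (by norm_num)]
  have hc : (if (2:Int) < 2*(m:Int) then ((2*(m:Int) - 2 + 2 - 1)/2).toNat else 0) = m - 1 := by
    split <;> omega
  rw [hc]

-- the distance-name shape: segment 0 gives the base name, segment k gives two names
lemma pv_flat_dist {α : Type} (f : Int → α) (c : α) (h0 : c = f 0) (m : Nat) :
    (List.range (m+1)).flatMap (fun (k : Nat) => if ((k:Nat):Int) = 0 then [c] else [f (2*(k:Int)-1), f (2*(k:Int))]) =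
      (List.range (2*m+1)).map (fun (k : Nat) => f (k:Int)) := by
  induction m with
  | zero => simp [h0]
  | succ m ih =>
    rw [List.range_succ, List.flatMap_append, ih]
    have h1 : ¬ (((m+1:Nat)):Int) = 0 := by push_cast; omega
    have h2 : List.range (2*(m+1)+1) = List.range (2*m+1) ++ [2*m+1, 2*m+1+1] := by
      rw [show 2*(m+1)+1 = ((2*m+1)+1)+1 from by ring, List.range_succ, List.range_succ,
          List.append_assoc]
      rfl
    simp only [List.flatMap_cons, List.flatMap_nil, List.append_nil]
    rw [if_neg h1, h2, List.map_append]
    congr 1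
    simp only [List.map_cons, List.map_nil]
    try (push_cast; ring_nf)

-- the skip-segment-0 singleton shape
lemma pv_flat_skip {α : Type} (g : Int → α) (m : Nat) :
    (List.range m).flatMap (fun (k : Nat) => if ((k:Nat):Int) = 0 then [] else [g (k:Int)]) =
      (List.range (m-1)).map (fun (k : Nat) => g ((k:Int)+1)) := by
  induction m with
  | zero => simp
  | succ m ih =>
    rw [List.range_succ, List.flatMap_append, ih]
    cases m with
    | zero => simp
    | succ m' =>
      have h1 : ¬ (((m'+1:Nat)):Int) = 0 := by push_cast; omega
      simp only [List.flatMap_cons, List.flatMap_nil, List.append_nil]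
      rw [if_neg h1, Nat.add_sub_cancel, Nat.add_sub_cancel, List.range_succ, List.map_append]
      congr 1

-- the guarded singleton shape (only segments j < m contribute)
lemma pv_flat_guard {α : Type} (g : Int → α) (m : Nat) :
    (List.range (m+1)).flatMap (fun (k : Nat) => if ((k:Nat):Int) = 0 then [] else if (k:Int) < (m:Int) then [g (k:Int)] else []) =
      (List.range (m-1)).map (fun (k : Nat) => g ((k:Int)+1)) := by
  rw [List.range_succ, List.flatMap_append]
  have h1 : (List.range m).flatMap (fun (k : Nat) => if ((k:Nat):Int) = 0 then [] else if (k:Int) < (m:Int) then [g (k:Int)] else []) =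
      (List.range m).flatMap (fun (k : Nat) => if ((k:Nat):Int) = 0 then [] else [g (k:Int)]) := by
    apply List.flatMap_congr
    intro k hk
    have hk' : ((k:Nat):Int) < (m:Int) := by exact_mod_cast List.mem_range.mp hk
    split_ifs <;> simp_all
  have h2 : (List.flatMap (fun (k : Nat) => if ((k:Nat):Int) = 0 then [] else if (k:Int) < (m:Int) then [g (k:Int)] else []) [m]) = ([] : List α) := by
    simp only [List.flatMap_cons, List.flatMap_nil, List.append_nil]
    split_ifs with ha hb
    · rfl
    · exact absurd hb (lt_irrefl _)
    · rfl
  rw [h1, h2, pv_flat_skip, List.append_nil]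

-- the two-line distance-case shape per segment
lemma pv_flat_dcf {α : Type} (g : Int → Int → α) (m : Nat) :
    (List.range (m+1)).flatMap (fun (k : Nat) => if ((k:Nat):Int) = 0 then []
        else [g ((2*(k:Int)-1)-1) (2*(k:Int)-1), g (2*(k:Int)-1) (2*(k:Int))]) =
      (List.range (2*m)).map (fun (k : Nat) => g (k:Int) ((k:Int)+1)) := by
  induction m with
  | zero => simp
  | succ m ih =>
    rw [List.range_succ, List.flatMap_append, ih]
    have h1 : ¬ (((m+1:Nat)):Int) = 0 := by push_cast; omega
    have h2 : List.range (2*(m+1)) = List.range (2*m) ++ [2*m, 2*m+1] := by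
      rw [show 2*(m+1) = ((2*m)+1)+1 from by ring, List.range_succ, List.range_succ,
          List.append_assoc]
      rfl
    simp only [List.flatMap_cons, List.flatMap_nil, List.append_nil]
    rw [if_neg h1, h2, List.map_append]
    congr 1
    simp only [List.map_cons, List.map_nil]
    try (push_cast; ring_nf)

-- Int-level bridges from B's per-segment flatMaps to A's comprehensions
lemma pvB_dist {α : Type} (f : Int → α) (c : α) (h0 : c = f 0) (n : Int) (hn : 0 ≤ n) :
    (PySem.List.pyRange 0 (n+1) 1).flatMap (fun j => if j = 0 then [c] else [f (2*j-1), f (2*j)]) =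
      (PySem.List.pyRange 0 (2*n+1) 1).map f := by
  obtain ⟨m, rfl⟩ := pv_nonneg_nat n hn
  rw [show (m:Int)+1 = ((m+1:Nat):Int) from by push_cast; ring, pv_range_cast (m+1),
      List.flatMap_map, pv_flat_dist f c h0 m,
      show 2*(m:Int)+1 = ((2*m+1:Nat):Int) from by push_cast; ring, pv_range_cast (2*m+1),
      List.map_map]
  rfl

lemma pvB_obst (n : Int) (hn : 0 ≤ n) :
    (PySem.List.pyRange 0 (n+1) 1).flatMap (fun j => if j = 0 then [] else ["obst_" ++ PySem.Int.toStr j]) =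
      (PySem.List.pyRange 0 n 1).map (fun i => "obst_" ++ PySem.Int.toStr (i + 1)) := by
  obtain ⟨m, rfl⟩ := pv_nonneg_nat n hn
  rw [show (m:Int)+1 = ((m+1:Nat):Int) from by push_cast; ring, pv_range_cast (m+1),
      List.flatMap_map, pv_flat_skip (fun j => "obst_" ++ PySem.Int.toStr j) (m+1),
      Nat.add_sub_cancel, pv_range_cast m, List.map_map]
  rfl

lemma pvB_mvo {α : Type} (f : Int → α) (n : Int) (hn : 0 ≤ n) :
    (PySem.List.pyRange 0 (n+1) 1).flatMap (fun j => if j = 0 then [] else [f (2*j-1)]) =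
      (PySem.List.pyRange 1 (2*n) 2).map f := by
  obtain ⟨m, rfl⟩ := pv_nonneg_nat n hn
  rw [show (m:Int)+1 = ((m+1:Nat):Int) from by push_cast; ring, pv_range_cast (m+1),
      List.flatMap_map, pv_flat_skip (fun j => f (2*j-1)) (m+1), Nat.add_sub_cancel,
      pv_step2_from1 m, List.map_map]
  apply List.map_congr_left
  intro k _
  simp only [Function.comp]
  congr 1; ring

lemma pvB_dct {α : Type} (h : Int → Int → α) (n : Int) (hn : 0 ≤ n) :
    (PySem.List.pyRange 0 (n+1) 1).flatMap (fun j => if j = 0 then [] else [h (2*j-1) (2*j)]) =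
      (PySem.List.pyRange 1 (2*n) 2).map (fun i => h i (i+1)) := by
  obtain ⟨m, rfl⟩ := pv_nonneg_nat n hn
  rw [show (m:Int)+1 = ((m+1:Nat):Int) from by push_cast; ring, pv_range_cast (m+1),
      List.flatMap_map, pv_flat_skip (fun j => h (2*j-1) (2*j)) (m+1), Nat.add_sub_cancel,
      pv_step2_from1 m, List.map_map]
  apply List.map_congr_left
  intro k _
  simp only [Function.comp]
  congr 1 <;> ring

lemma pvB_guard2 {α : Type} (f : Int → Int → α) (n : Int) (hn : 0 ≤ n) :
    (PySem.List.pyRange 0 (n+1) 1).flatMap (fun j => if j = 0 then [] else if j < n then [f (2*j) j] else []) =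
      (PySem.List.pyRange 2 (2*n) 2).map (fun i => f i (PySem.Int.floordiv (i+1) 2)) := by
  obtain ⟨m, rfl⟩ := pv_nonneg_nat n hn
  rw [show (m:Int)+1 = ((m+1:Nat):Int) from by push_cast; ring, pv_range_cast (m+1),
      List.flatMap_map, pv_flat_guard (fun j => f (2*j) j) m, pv_step2_from2 m, List.map_map]
  apply List.map_congr_left
  intro k _
  simp only [Function.comp]
  have h1 : 2*((k:Int)+1) = 2+2*(k:Int) := by ring
  have h2 : PySem.Int.floordiv ((2+2*(k:Int))+1) 2 = (k:Int)+1 := by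
    rw [PySem.Int.floordiv_eq_ediv_of_pos (by norm_num)]; omega
  rw [h1, h2]

lemma pvB_dcf {α : Type} (g : Int → Int → α) (n : Int) (hn : 0 ≤ n) :
    (PySem.List.pyRange 0 (n+1) 1).flatMap (fun j => if j = 0 then []
        else [g ((2*j-1)-1) (2*j-1), g (2*j-1) (2*j)]) =
      (PySem.List.pyRange 0 (2*n) 1).map (fun i => g i (i+1)) := by
  obtain ⟨m, rfl⟩ := pv_nonneg_nat n hn
  rw [show (m:Int)+1 = ((m+1:Nat):Int) from by push_cast; ring, pv_range_cast (m+1),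
      List.flatMap_map, pv_flat_dcf g m,
      show 2*(m:Int) = ((2*m:Nat):Int) from by push_cast; ring, pv_range_cast (2*m),
      List.map_map]
  rfl

-- projections of a segment, written out
lemma pvSeg1 (j n : Int) : (pvSegment j n).1 =
    if j = 0 then ["d_0"] else ["d_" ++ PySem.Int.toStr (50 * (2*j-1)), "d_" ++ PySem.Int.toStr (50 * (2*j))] := by
  unfold pvSegment; split <;> rfl

lemma pvSeg2 (j n : Int) : (pvSegment j n).2.1 =
    if j = 0 then [] else ["obst_" ++ PySem.Int.toStr j] := by
  unfold pvSegment; split <;> rfl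

lemma pvSeg3 (j n : Int) : (pvSegment j n).2.2.1 =
    if j = 0 then [] else ["aircraft_movement = move_forward & distance = d_" ++ PySem.Int.toStr (50 * (2*j-1))
      ++ " : {move_forward, turn_right};"] := by
  unfold pvSegment; split <;> rfl

lemma pvSeg4 (j n : Int) : (pvSegment j n).2.2.2.1 =
    if j = 0 then [] else if j < n then
      ["aircraft_movement = move_forward & distance = d_" ++ PySem.Int.toStr (50 * (2*j))
        ++ " & obstacles = obst_" ++ PySem.Int.toStr j ++ ": stop;"] else [] := by
  unfold pvSegment; split <;> rfl

lemma pvSeg5 (j n : Int) : (pvSegment j n).2.2.2.2.1 =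
    if j = 0 then [] else
      ["aircraft_movement = move_forward & distance = d_" ++ PySem.Int.toStr (50 * ((2*j-1) - 1))
        ++ " : d_" ++ PySem.Int.toStr (50 * (2*j-1)) ++ ";",
       "aircraft_movement = move_forward & distance = d_" ++ PySem.Int.toStr (50 * (2*j-1))
        ++ " : d_" ++ PySem.Int.toStr (50 * (2*j)) ++ ";"] := by
  unfold pvSegment; split <;> rfl

lemma pvSeg6 (j n : Int) : (pvSegment j n).2.2.2.2.2.1 =
    if j = 0 then [] else
      ["aircraft_movement = turn_right & distance = d_" ++ PySem.Int.toStr (50 * (2*j-1))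
        ++ " : d_" ++ PySem.Int.toStr (50 * (2*j)) ++ ";"] := by
  unfold pvSegment; split <;> rfl

lemma pvSeg7 (j n : Int) : (pvSegment j n).2.2.2.2.2.2 =
    if j = 0 then [] else if j < n then
      ["aircraft_movement = move_forward & distance = d_" ++ PySem.Int.toStr (50 * (2*j))
        ++ " : obst_" ++ PySem.Int.toStr j ++ ";"] else [] := by
  unfold pvSegment; split <;> rfl

-- the one pass accumulates componentwise concatenations of the segments
theorem pvApp7_foldl (n : Int) (l : List Int)
    (x : List String × List String × List String × List String × List String × List String × List String) :
    l.foldl (fun acc j => pvApp7 acc (pvSegment j n)) x =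
      (x.1 ++ l.flatMap (fun j => (pvSegment j n).1),
       x.2.1 ++ l.flatMap (fun j => (pvSegment j n).2.1),
       x.2.2.1 ++ l.flatMap (fun j => (pvSegment j n).2.2.1),
       x.2.2.2.1 ++ l.flatMap (fun j => (pvSegment j n).2.2.2.1),
       x.2.2.2.2.1 ++ l.flatMap (fun j => (pvSegment j n).2.2.2.2.1),
       x.2.2.2.2.2.1 ++ l.flatMap (fun j => (pvSegment j n).2.2.2.2.2.1),
       x.2.2.2.2.2.2 ++ l.flatMap (fun j => (pvSegment j n).2.2.2.2.2.2)) := by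
  induction l generalizing x with
  | nil => simp
  | cons j l ih =>
    rw [List.foldl_cons, ih]
    simp [pvApp7, List.flatMap_cons, List.append_assoc]

-- ===== VERDICT (by name: the statement is the Claim_ definition above) =====
theorem generate_nusmv_code_spec : Claim_equal_generate_nusmv_code := by
  intro n _
  unfold Spec_generate_nusmv_code
  by_cases hn : 0 ≤ n
  · simp only [generate_nusmv_code, generate_nusmv_code_alt]
    rw [pvApp7_foldl]
    simp only [List.nil_append, pvSeg1, pvSeg2, pvSeg3, pvSeg4, pvSeg5, pvSeg6, pvSeg7]
    rw [pvB_dist (fun i => "d_" ++ PySem.Int.toStr (50 * i)) "d_0" (by decide) n hn,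
        pvB_obst n hn,
        pvB_mvo (fun i => "aircraft_movement = move_forward & distance = d_" ++ PySem.Int.toStr (50 * i)
          ++ " : {move_forward, turn_right};") n hn,
        pvB_guard2 (fun d o => "aircraft_movement = move_forward & distance = d_" ++ PySem.Int.toStr (50 * d)
          ++ " & obstacles = obst_" ++ PySem.Int.toStr o ++ ": stop;") n hn,
        pvB_dcf (fun a b => "aircraft_movement = move_forward & distance = d_" ++ PySem.Int.toStr (50 * a)
          ++ " : d_" ++ PySem.Int.toStr (50 * b) ++ ";") n hn,
        pvB_dct (fun a b => "aircraft_movement = turn_right & distance = d_" ++ PySem.Int.toStr (50 * a)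
          ++ " : d_" ++ PySem.Int.toStr (50 * b) ++ ";") n hn,
        pvB_guard2 (fun d o => "aircraft_movement = move_forward & distance = d_" ++ PySem.Int.toStr (50 * d)
          ++ " : obst_" ++ PySem.Int.toStr o ++ ";") n hn]
  · have h1 : PySem.List.pyRange 0 (n+1) 1 = [] := PySem.List.pyRange_one_eq_nil (by omega)
    have h2 : PySem.List.pyRange 0 (2*n+1) 1 = [] := PySem.List.pyRange_one_eq_nil (by omega)
    have h3 : PySem.List.pyRange 0 n 1 = [] := PySem.List.pyRange_one_eq_nil (by omega)
    have h4 : PySem.List.pyRange 1 (2*n) 2 = [] := by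
      rw [PySem.List.pyRange_of_pos _ _ (by norm_num), if_neg (by omega)]; simp
    have h5 : PySem.List.pyRange 2 (2*n) 2 = [] := by
      rw [PySem.List.pyRange_of_pos _ _ (by norm_num), if_neg (by omega)]; simp
    have h6 : PySem.List.pyRange 0 (2*n) 1 = [] := PySem.List.pyRange_one_eq_nil (by omega)
    simp only [generate_nusmv_code, generate_nusmv_code_alt]
    rw [h1, h2, h3, h4, h5, h6]
    simp
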